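-- pv_equiv track=rewrite | github.com/Shaurya0108/langhub-poc | app/agents/coder/coder.py | _parse_valid_response
-- ===== SOURCE A (Python) =====
-- from typing import List, Dict, Union
--
-- def _parse_valid_response(response: str) -> List[Dict[str, str]]:
--     # Parsing the response to extract code blocks in the specified format
--     response = response.strip().strip("~~~")
--     files = []
--     current_file = None
--     current_code = []
--
--     for line in response.splitlines():
--         if line.startswith("File:"):
--             if current_file:
--                 files.append({"file": current_file, "code": "\n".join(current_code)})
--             current_file = line.split(":")[1].strip()
--             current_code = []
--         elif line.startswith("```"):
--             continue
--         else:
--             current_code.append(line)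
--
--     if current_file:
--         files.append({"file": current_file, "code": "\n".join(current_code)})
--
--     return files
-- ===== SOURCE B (Python) =====
-- from typing import List, Dict, Union
--
-- def _parse_valid_response(response: str) -> List[Dict[str, str]]:
--     # Blockwise recursive parse: peel off one "File:" block at a time.
--     return _blocks(response.strip().strip("~~~").splitlines())
--
-- def _blocks(lines: List[str]) -> List[Dict[str, str]]:
--     if not lines:
--         return []
--     head, rest = lines[0], lines[1:]
--     if not head.startswith("File:"):
--         return _blocks(rest)
--     body_len = next((i for i, l in enumerate(rest) if l.startswith("File:")), len(rest))
--     name = head.split(":")[1].strip()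
--     body = [l for l in rest[:body_len] if not l.startswith("```")]
--     block = [{"file": name, "code": "\n".join(body)}] if name else []
--     return block + _blocks(rest[body_len:])
-- ===== Notes on version B (the rewrite author's own statement) =====
-- stated objective: alternative
-- what changed: Replaces A's single stateful pass carrying current_file/current_code with a blockwise recursion that peels off one header-led group of lines at a time and maps each group directly to its result dict.
import Mathlib
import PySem

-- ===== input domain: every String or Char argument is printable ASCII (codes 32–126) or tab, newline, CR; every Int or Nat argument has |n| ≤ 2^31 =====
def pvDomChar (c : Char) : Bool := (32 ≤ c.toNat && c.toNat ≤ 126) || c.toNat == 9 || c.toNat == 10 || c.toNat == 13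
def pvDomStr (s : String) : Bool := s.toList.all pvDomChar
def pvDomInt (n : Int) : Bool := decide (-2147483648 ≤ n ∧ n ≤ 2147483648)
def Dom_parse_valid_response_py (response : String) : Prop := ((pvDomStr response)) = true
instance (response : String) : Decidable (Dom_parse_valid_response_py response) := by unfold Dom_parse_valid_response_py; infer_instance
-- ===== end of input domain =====

-- B replaces A's single stateful pass (current_file/current_code) by a blockwise recursion
-- that peels off one "File:" group at a time and maps it to its dict (objective: alternative).

-- ===== PORT A =====
-- one dict {"file": f, "code": "\n".join(code)}
def pvMkBlock (f : String) (code : List String) : List (String × String) :=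
  [("file", f), ("code", PySem.Str.join "\n" code)]

-- line.split(":")[1]; index 1 always exists when line starts with "File:", so getD is exact there
def pvField1 (line : String) : String :=
  ((PySem.Str.split? line ":").getD []).getD 1 ""

-- the loop body of A: state = (files, current_file (none = Python's None), current_code)
def pvStepA (st : List (List (String × String)) × Option String × List String)
    (line : String) : List (List (String × String)) × Option String × List String :=
  if PySem.Str.startswith line "File:" then
    let files :=
      match st.2.1 with          -- `if current_file:` — truthy iff not None and not ""
      | some f => if f ≠ "" then st.1 ++ [pvMkBlock f st.2.2] else st.1
      | none => st.1
    (files, some (PySem.Str.strip (pvField1 line)), [])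
  else if PySem.Str.startswith line "```" then st
  else (st.1, st.2.1, st.2.2 ++ [line])

-- the trailing `if current_file: files.append(...)`
def pvFinalA (st : List (List (String × String)) × Option String × List String) :
    List (List (String × String)) :=
  match st.2.1 with
  | some f => if f ≠ "" then st.1 ++ [pvMkBlock f st.2.2] else st.1
  | none => st.1

def parse_valid_response_py (response : String) : List (List (String × String)) :=
  let r := PySem.Str.stripChars (PySem.Str.strip response) "~~~"
  pvFinalA ((PySem.Str.splitlines r).foldl pvStepA ([], none, []))

-- ===== PORT B =====
def pvNotHeader (l : String) : Bool := !(PySem.Str.startswith l "File:")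

-- _blocks: peel one "File:"-headed group at a time (next(...)/slices ported as takeWhile/dropWhile)
def pvBlocksB : List String → List (List (String × String))
  | [] => []
  | head :: rest =>
    if PySem.Str.startswith head "File:" then
      let body := (rest.takeWhile pvNotHeader).filter (fun l => !(PySem.Str.startswith l "```"))
      let name := PySem.Str.strip (pvField1 head)
      (if name ≠ "" then [[("file", name), ("code", PySem.Str.join "\n" body)]] else [])
        ++ pvBlocksB (rest.dropWhile pvNotHeader)
    else pvBlocksB rest
termination_by lines => lines.length
decreasing_by
  · exact Nat.lt_succ_of_le (List.length_dropWhile_le _ _)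
  · simp

def parse_valid_response_py_alt (response : String) : List (List (String × String)) :=
  pvBlocksB (PySem.Str.splitlines (PySem.Str.stripChars (PySem.Str.strip response) "~~~"))

-- ===== PRECONDITION & SPEC =====
def Spec_parse_valid_response_py (response : String) (out : List (List (String × String))) : Prop := out = parse_valid_response_py_alt response
instance (response : String) (out : List (List (String × String))) : Decidable (Spec_parse_valid_response_py response out) := by unfold Spec_parse_valid_response_py; infer_instance

-- ===== CLAIM (what is proved, stated in full; the proofs are below) =====
def Claim_equal_parse_valid_response_py : Prop := ∀ (response : String), Dom_parse_valid_response_py response → Spec_parse_valid_response_py response (parse_valid_response_py response)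

-- ===== LEMMAS AND PROOFS =====

-- what the final `if current_file:` emits from a pending (current_file, current_code)
def pvEmit (cur : Option String) (code : List String) : List (List (String × String)) :=
  match cur with
  | some f => if f ≠ "" then [pvMkBlock f code] else []
  | none => []

lemma pvBlocksB_skip (lines : List String) :
    pvBlocksB (lines.dropWhile pvNotHeader) = pvBlocksB lines := by
  induction lines with
  | nil => rfl
  | cons l ls ih =>
    cases hc : PySem.Str.startswith l "File:" with
    | true =>
      have hc' : PySem.Chars.startswith l.toList ['F', 'i', 'l', 'e', ':'] = true := by simpa using hc
      have hd : List.dropWhile pvNotHeader (l :: ls) = l :: ls := by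
        simp [pvNotHeader, hc']
      rw [hd]
    | false =>
      have hc' : PySem.Chars.startswith l.toList ['F', 'i', 'l', 'e', ':'] = false := by simpa using hc
      have hd : List.dropWhile pvNotHeader (l :: ls) = List.dropWhile pvNotHeader ls := by
        simp [pvNotHeader, hc']
      rw [hd, ih, pvBlocksB, if_neg (by simp [hc'])]

lemma pvFoldA_eq (lines : List String) :
    ∀ (fs : List (List (String × String))) (cur : Option String) (code : List String),
    pvFinalA (lines.foldl pvStepA (fs, cur, code))
      = fs ++ pvEmit cur (code ++ (lines.takeWhile pvNotHeader).filter
            (fun l => !(PySem.Str.startswith l "```")))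
        ++ pvBlocksB (lines.dropWhile pvNotHeader) := by
  induction lines with
  | nil =>
    intro fs cur code
    cases cur with
    | none => simp [pvFinalA, pvEmit, pvBlocksB]
    | some f =>
      by_cases hf : f = "" <;> simp [pvFinalA, pvEmit, pvBlocksB, hf]
  | cons l ls ih =>
    intro fs cur code
    rw [List.foldl_cons]
    cases hc : PySem.Str.startswith l "File:" with
    | true =>
      have hc' : PySem.Chars.startswith l.toList ['F', 'i', 'l', 'e', ':'] = true := by simpa using hc
      have hd : List.dropWhile pvNotHeader (l :: ls) = l :: ls := by
        simp [pvNotHeader, hc']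
      have htk : List.takeWhile pvNotHeader (l :: ls) = [] := by
        simp [pvNotHeader, hc']
      have hstep : pvStepA (fs, cur, code) l
          = (fs ++ pvEmit cur code, some (PySem.Str.strip (pvField1 l)), []) := by
        cases cur with
        | none => simp [pvStepA, hc', pvEmit]
        | some f => by_cases hf : f = "" <;> simp [pvStepA, hc', pvEmit, hf]
      rw [hstep, ih, hd, htk, pvBlocksB, if_pos hc]
      cases hn : decide (PySem.Str.strip (pvField1 l) = "") with
      | true =>
        have hn' : PySem.Str.strip (pvField1 l) = "" := of_decide_eq_true hn
        simp [pvEmit, hn', List.append_assoc]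
      | false =>
        have hn' : ¬ PySem.Str.strip (pvField1 l) = "" := of_decide_eq_false hn
        simp [pvEmit, hn', pvMkBlock, List.append_assoc]
    | false =>
      have hc' : PySem.Chars.startswith l.toList ['F', 'i', 'l', 'e', ':'] = false := by simpa using hc
      have hd : List.dropWhile pvNotHeader (l :: ls) = List.dropWhile pvNotHeader ls := by
        simp [pvNotHeader, hc']
      have htk : List.takeWhile pvNotHeader (l :: ls) = l :: List.takeWhile pvNotHeader ls := by
        simp [pvNotHeader, hc']
      cases ht : PySem.Str.startswith l "```" with
      | true =>
        have ht' : PySem.Chars.startswith l.toList ['`', '`', '`'] = true := by simpa using ht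
        have hstep : pvStepA (fs, cur, code) l = (fs, cur, code) := by
          simp [pvStepA, hc', ht']
        rw [hstep, ih, hd, htk]
        simp [ht']
      | false =>
        have ht' : PySem.Chars.startswith l.toList ['`', '`', '`'] = false := by simpa using ht
        have hstep : pvStepA (fs, cur, code) l = (fs, cur, code ++ [l]) := by
          simp [pvStepA, hc', ht']
        rw [hstep, ih, hd, htk]
        simp [ht', List.append_assoc]

-- ===== VERDICT (by name: the statement is the Claim_ definition above) =====
theorem parse_valid_response_py_spec : Claim_equal_parse_valid_response_py := by
  intro response _
  unfold Spec_parse_valid_response_py parse_valid_response_py parse_valid_response_py_alt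
  rw [pvFoldA_eq]
  simp [pvEmit, pvBlocksB_skip]
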